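-- pv_equiv track=rewrite | github.com/pypi-data/pypi-mirror-324 | packages/optimum-rbln/optimum_rbln-0.1.1-py3-none-any.whl/optimum/rbln/modeling_base.py | pop_rbln_kwargs_from_kwargs
-- ===== SOURCE A (Python) =====
-- def pop_rbln_kwargs_from_kwargs(kwargs: dict):
--     keys = list(kwargs.keys())
--     rbln_constructor_kwargs = {
--         key: kwargs.pop(key) for key in keys if key in ["rbln_device", "rbln_device_map", "rbln_create_runtimes"]
--     }
--
--     keys = list(kwargs.keys())
--     rbln_config_kwargs = {key: kwargs.pop(key) for key in keys if key.startswith("rbln_")}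
--     return rbln_config_kwargs, rbln_constructor_kwargs
-- ===== SOURCE B (Python) =====
-- def pop_rbln_kwargs_from_kwargs(kwargs: dict):
--     rbln_config_kwargs = {}
--     rbln_constructor_kwargs = {}
--     rest = {}
--     for key, value in kwargs.items():
--         if key in ("rbln_device", "rbln_device_map", "rbln_create_runtimes"):
--             rbln_constructor_kwargs[key] = value
--         elif key.startswith("rbln_"):
--             rbln_config_kwargs[key] = value
--         else:
--             rest[key] = value
--     kwargs.clear()
--     kwargs.update(rest)
--     return rbln_config_kwargs, rbln_constructor_kwargs
-- ===== Notes on version B (the rewrite author's own statement) =====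
-- stated objective: simpler
-- what changed: Replaces A's two staged snapshot-keys-then-pop comprehensions (each rescanning and mutating the dict) with one single pass over kwargs.items() that classifies every entry into constructor/config/rest accumulators, then rebuilds kwargs from rest; Pre_ excludes association lists with duplicate keys, which do not represent a Python dict argument (a dict collapses duplicates), so A never receives them.
import Mathlib
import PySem

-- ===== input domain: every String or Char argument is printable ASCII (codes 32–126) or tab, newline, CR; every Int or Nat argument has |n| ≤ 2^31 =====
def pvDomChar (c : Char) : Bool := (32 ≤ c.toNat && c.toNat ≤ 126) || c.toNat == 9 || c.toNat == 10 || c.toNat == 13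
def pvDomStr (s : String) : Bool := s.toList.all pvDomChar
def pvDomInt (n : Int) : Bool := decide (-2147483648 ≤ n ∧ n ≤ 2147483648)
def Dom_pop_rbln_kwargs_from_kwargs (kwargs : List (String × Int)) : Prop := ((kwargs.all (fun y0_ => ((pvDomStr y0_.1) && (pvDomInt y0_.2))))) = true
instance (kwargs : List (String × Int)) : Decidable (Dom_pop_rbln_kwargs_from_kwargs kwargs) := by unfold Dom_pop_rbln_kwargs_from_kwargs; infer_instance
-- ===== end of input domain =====

-- B replaces A's two staged pop-comprehensions by one classifying pass with accumulators
-- (objective: simpler); Source B performs the same net mutation of the caller's dict as A, the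
-- theorems here are about the return value.


-- ===== PORT A =====
-- the literal list ["rbln_device", "rbln_device_map", "rbln_create_runtimes"] of the membership tests
def pvCtorKeys : List String := ["rbln_device", "rbln_device_map", "rbln_create_runtimes"]

-- A: keys = list(kwargs.keys()); {key: kwargs.pop(key) for key in keys if key in [...]};
--    keys = list(kwargs.keys()); {key: kwargs.pop(key) for key in keys if key.startswith("rbln_")}
def pop_rbln_kwargs_from_kwargs (kwargs : List (String × Int)) : (List (String × Int)) × (List (String × Int)) :=
  let d0 : PySem.Dict String Int := PySem.Dict.mk kwargs
  let keys := d0.keys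
  let s1 := keys.foldl (fun (st : PySem.Dict String Int × PySem.Dict String Int) key =>
      if pvCtorKeys.contains key then
        match st.1.pop? key with
        | some (v, d') => (d', st.2.insert key v)
        | none => st      -- kwargs.pop(key) cannot fail: key comes from the keys snapshot of a dict
      else st) (d0, PySem.Dict.empty)
  let keys2 := s1.1.keys
  let s2 := keys2.foldl (fun (st : PySem.Dict String Int × PySem.Dict String Int) key =>
      if PySem.Str.startswith key "rbln_" then
        match st.1.pop? key with
        | some (v, d') => (d', st.2.insert key v)
        | none => st
      else st) (s1.1, PySem.Dict.empty)
  (s2.2.items, s1.2.items)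

-- ===== PORT B =====
-- B: one pass over kwargs.items() classifying each entry into (config, constructor, rest)
-- accumulators; Source B's final clear/update only rebuilds the caller's dict from rest and has no
-- counterpart in this value-level port.
def pop_rbln_kwargs_from_kwargs_alt (kwargs : List (String × Int)) : (List (String × Int)) × (List (String × Int)) :=
  let st := kwargs.foldl
    (fun (st : List (String × Int) × List (String × Int) × List (String × Int)) kv =>
      if pvCtorKeys.contains kv.1 then (st.1, st.2.1 ++ [kv], st.2.2)
      else if PySem.Str.startswith kv.1 "rbln_" then (st.1 ++ [kv], st.2.1, st.2.2)
      else (st.1, st.2.1, st.2.2 ++ [kv]))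
    ([], [], [])
  (st.1, st.2.1)

-- ===== PRECONDITION & SPEC =====
-- Pre_ excludes association lists with duplicate keys: they do not represent a Python dict
-- argument (a dict collapses duplicates), so A never receives them.
def Pre_pop_rbln_kwargs_from_kwargs (kwargs : List (String × Int)) : Prop :=
  (kwargs.map Prod.fst).Nodup
instance (kwargs : List (String × Int)) : Decidable (Pre_pop_rbln_kwargs_from_kwargs kwargs) := by unfold Pre_pop_rbln_kwargs_from_kwargs; infer_instance

def pvWitness_pop_rbln_kwargs_from_kwargs : (List (String × Int)) :=
  [("rbln_device", 1), ("rbln_foo", 2), ("x", 3)]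

def Spec_pop_rbln_kwargs_from_kwargs (kwargs : List (String × Int)) (out : (List (String × Int)) × (List (String × Int))) : Prop := out = pop_rbln_kwargs_from_kwargs_alt kwargs
instance (kwargs : List (String × Int)) (out : (List (String × Int)) × (List (String × Int))) : Decidable (Spec_pop_rbln_kwargs_from_kwargs kwargs out) := by unfold Spec_pop_rbln_kwargs_from_kwargs; infer_instance

-- ===== CLAIM (what is proved, stated in full; the proofs are below) =====
def Claim_equal_pop_rbln_kwargs_from_kwargs : Prop := ∀ (kwargs : List (String × Int)), Dom_pop_rbln_kwargs_from_kwargs kwargs → Pre_pop_rbln_kwargs_from_kwargs kwargs → Spec_pop_rbln_kwargs_from_kwargs kwargs (pop_rbln_kwargs_from_kwargs kwargs)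

-- ===== LEMMAS AND PROOFS =====

theorem pvWitness_ok :
    Dom_pop_rbln_kwargs_from_kwargs pvWitness_pop_rbln_kwargs_from_kwargs ∧
    Pre_pop_rbln_kwargs_from_kwargs pvWitness_pop_rbln_kwargs_from_kwargs := by
  constructor <;> decide

-- first lookup in pre ++ (k,v)::t finds v when k is not a key of pre
theorem pvGet_eq {pre t : List (String × Int)} {k : String} {v : Int}
    (hpre : k ∉ pre.map Prod.fst) :
    (PySem.Dict.mk (pre ++ (k, v) :: t)).get? k = some v := by
  induction pre with
  | nil => simp [PySem.Dict.get?]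
  | cons e pre ih =>
      simp only [List.map_cons, List.mem_cons] at hpre
      push_neg at hpre
      simp only [List.cons_append, PySem.Dict.get?, PySem.Dict.items, List.find?]
      have : (e.1 == k) = false := by simp [Ne.symm hpre.1]
      rw [this]
      exact ih hpre.2

-- erasing k from pre ++ (k,v)::t removes exactly (k,v) when k occurs nowhere else
theorem pvErase_eq {pre t : List (String × Int)} {k : String} {v : Int}
    (hpre : k ∉ pre.map Prod.fst) (ht : k ∉ t.map Prod.fst) :
    (PySem.Dict.mk (pre ++ (k, v) :: t)).erase k = PySem.Dict.mk (pre ++ t) := by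
  simp only [PySem.Dict.erase]
  congr 1
  rw [List.filter_append, List.filter_cons]
  have hfp : pre.filter (fun p => !p.1 == k) = pre := by
    apply List.filter_eq_self.mpr
    intro a ha
    simp only [Bool.not_eq_eq_eq_not, Bool.not_true, beq_eq_false_iff_ne]
    exact fun h => hpre (h ▸ List.mem_map_of_mem ha)
  have hft : t.filter (fun p => !p.1 == k) = t := by
    apply List.filter_eq_self.mpr
    intro a ha
    simp only [Bool.not_eq_eq_eq_not, Bool.not_true, beq_eq_false_iff_ne]
    exact fun h => ht (h ▸ List.mem_map_of_mem ha)
  simp [hfp, hft]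

-- inserting a fresh key appends
theorem pvInsert_fresh {acc : List (String × Int)} {k : String} {v : Int}
    (h : k ∉ acc.map Prod.fst) :
    (PySem.Dict.mk acc).insert k v = PySem.Dict.mk (acc ++ [(k, v)]) := by
  have hc : (PySem.Dict.mk acc).contains k = false := by
    simp only [PySem.Dict.contains, List.any_eq_false]
    intro q hq hkq
    exact h ((eq_of_beq hkq) ▸ List.mem_map_of_mem hq)
  unfold PySem.Dict.insert
  rw [hc]
  simp

-- the shared shape of both of A's pop-loops: iterating the key snapshot of the tail t of the
-- dict pre ++ t, popping the keys satisfying p into acc, filters t by p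
theorem pvPopLoop_eq (p : String → Bool) :
    ∀ (t pre acc : List (String × Int)),
    ((pre ++ t).map Prod.fst).Nodup → (∀ e ∈ t, e.1 ∉ acc.map Prod.fst) →
    (t.map Prod.fst).foldl (fun (st : PySem.Dict String Int × PySem.Dict String Int) key =>
        if p key then
          match st.1.pop? key with
          | some (v, d') => (d', st.2.insert key v)
          | none => st
        else st) (PySem.Dict.mk (pre ++ t), PySem.Dict.mk acc)
      = (PySem.Dict.mk (pre ++ t.filter (fun e => !p e.1)),
         PySem.Dict.mk (acc ++ t.filter (fun e => p e.1))) := by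
  intro t
  induction t with
  | nil => intro pre acc _ _; simp
  | cons e t ih =>
      intro pre acc hnd hacc
      obtain ⟨k, v⟩ := e
      have hnd' : ((pre ++ (k, v) :: t).map Prod.fst).Nodup := hnd
      rw [List.map_append, List.map_cons] at hnd'
      have hkpre : k ∉ pre.map Prod.fst := by
        intro h
        exact (List.disjoint_of_nodup_append hnd') h (List.mem_cons_self ..)
      have hkt : k ∉ t.map Prod.fst := by
        have h2 : (k :: t.map Prod.fst).Nodup := by
          have := (List.nodup_append.mp hnd').2.1
          simpa using this
        exact (List.nodup_cons.mp h2).1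
      simp only [List.map_cons, List.foldl_cons]
      by_cases hp : p k = true
      · rw [if_pos hp]
        have hget : (PySem.Dict.mk (pre ++ (k, v) :: t)).get? k = some v := pvGet_eq hkpre
        have hpop : (PySem.Dict.mk (pre ++ (k, v) :: t)).pop? k
            = some (v, PySem.Dict.mk (pre ++ t)) := by
          simp [PySem.Dict.pop?, hget, pvErase_eq hkpre hkt]
        rw [hpop]
        have hkacc : k ∉ acc.map Prod.fst := hacc (k, v) (List.mem_cons_self ..)
        simp only [pvInsert_fresh hkacc]
        have hnd2 : ((pre ++ t).map Prod.fst).Nodup := by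
          rw [List.map_append]
          exact hnd'.sublist ((List.sublist_cons_self _ _).append_left _)
        have hacc2 : ∀ e ∈ t, e.1 ∉ (acc ++ [(k, v)]).map Prod.fst := by
          intro e he
          rw [List.map_append, List.mem_append]
          rintro (h | h)
          · exact hacc e (List.mem_cons_of_mem _ he) h
          · simp only [List.map_cons, List.map_nil, List.mem_singleton] at h
            exact hkt (h ▸ List.mem_map_of_mem he)
        rw [ih pre (acc ++ [(k, v)]) hnd2 hacc2]
        rw [List.filter_cons, List.filter_cons]
        simp [hp, List.append_assoc]
      · rw [if_neg hp]
        have heq : PySem.Dict.mk (pre ++ (k, v) :: t)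
            = PySem.Dict.mk ((pre ++ [(k, v)]) ++ t) := by simp
        rw [heq]
        have hnd2 : (((pre ++ [(k, v)]) ++ t).map Prod.fst).Nodup := by
          simpa using hnd
        have hacc2 : ∀ e ∈ t, e.1 ∉ acc.map Prod.fst := fun e he =>
          hacc e (List.mem_cons_of_mem _ he)
        rw [ih (pre ++ [(k, v)]) acc hnd2 hacc2]
        rw [List.filter_cons, List.filter_cons]
        simp [hp, List.append_assoc]

-- B's single classifying pass, from arbitrary accumulators, appends the three filters
theorem pvClassify_eq :
    ∀ (t c k r : List (String × Int)),
    t.foldl (fun (st : List (String × Int) × List (String × Int) × List (String × Int)) kv =>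
        if pvCtorKeys.contains kv.1 then (st.1, st.2.1 ++ [kv], st.2.2)
        else if PySem.Str.startswith kv.1 "rbln_" then (st.1 ++ [kv], st.2.1, st.2.2)
        else (st.1, st.2.1, st.2.2 ++ [kv])) (c, k, r)
      = (c ++ t.filter (fun e => !pvCtorKeys.contains e.1 && PySem.Str.startswith e.1 "rbln_"),
         k ++ t.filter (fun e => pvCtorKeys.contains e.1),
         r ++ t.filter (fun e => !pvCtorKeys.contains e.1 && !PySem.Str.startswith e.1 "rbln_")) := by
  intro t
  induction t with
  | nil => intro c k r; simp
  | cons e t ih =>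
      intro c k r
      by_cases hc : pvCtorKeys.contains e.1 = true
      · have p1 : (!pvCtorKeys.contains e.1 && PySem.Str.startswith e.1 "rbln_") = false := by
          rw [hc]; rfl
        have p3 : (!pvCtorKeys.contains e.1 && !PySem.Str.startswith e.1 "rbln_") = false := by
          rw [hc]; rfl
        simp only [List.foldl_cons, if_pos hc, List.filter_cons, p1, p3, hc, ih]
        simp [List.append_assoc]
      · have hc' : pvCtorKeys.contains e.1 = false := by simpa using hc
        rw [List.foldl_cons]
        rw [if_neg hc]
        by_cases hs : PySem.Str.startswith e.1 "rbln_" = true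
        · have hsC : PySem.Chars.startswith e.1.toList ['r','b','l','n','_'] = true := by
            simpa [PySem.Str.startswith] using hs
          have p1 : (!pvCtorKeys.contains e.1 && PySem.Str.startswith e.1 "rbln_") = true := by
            rw [hc', hs]; rfl
          have p3 : (!pvCtorKeys.contains e.1 && !PySem.Str.startswith e.1 "rbln_") = false := by
            rw [hc', hs]; rfl
          simp only [if_pos hs, List.filter_cons, p1, p3, hc', ih]
          simp [hsC, List.append_assoc]
        · have hs' : PySem.Str.startswith e.1 "rbln_" = false := by simpa using hs
          have hsC : PySem.Chars.startswith e.1.toList ['r','b','l','n','_'] = false := by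
            simpa [PySem.Str.startswith] using hs'
          have p1 : (!pvCtorKeys.contains e.1 && PySem.Str.startswith e.1 "rbln_") = false := by
            rw [hc', hs']; rfl
          have p3 : (!pvCtorKeys.contains e.1 && !PySem.Str.startswith e.1 "rbln_") = true := by
            rw [hc', hs']; rfl
          simp only [if_neg hs, List.filter_cons, p1, p3, hc', ih]
          simp [hsC, List.append_assoc]

-- ===== VERDICT (by name: the statement is the Claim_ definition above) =====
theorem pop_rbln_kwargs_from_kwargs_spec : Claim_equal_pop_rbln_kwargs_from_kwargs := by
  intro kwargs _ hpre
  unfold Spec_pop_rbln_kwargs_from_kwargs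
  unfold pop_rbln_kwargs_from_kwargs pop_rbln_kwargs_from_kwargs_alt
  simp only [PySem.Dict.keys]
  rw [show (PySem.Dict.empty : PySem.Dict String Int) = PySem.Dict.mk [] from rfl]
  have h1 := pvPopLoop_eq (fun key => pvCtorKeys.contains key) kwargs [] []
    (by simpa using hpre) (by simp)
  simp only [List.nil_append] at h1
  rw [h1]
  have hnd1 : ((kwargs.filter (fun e => !pvCtorKeys.contains e.1)).map Prod.fst).Nodup :=
    hpre.sublist (List.Sublist.map Prod.fst List.filter_sublist)
  have h2 := pvPopLoop_eq (fun key => PySem.Str.startswith key "rbln_")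
    (kwargs.filter (fun e => !pvCtorKeys.contains e.1)) [] []
    (by simpa using hnd1) (by simp)
  simp only [List.nil_append] at h2
  rw [h2]
  rw [pvClassify_eq kwargs [] [] []]
  simp only [List.nil_append, List.filter_filter]
  have hcomm : ∀ a ∈ kwargs,
      (PySem.Str.startswith a.1 "rbln_" && !pvCtorKeys.contains a.1)
        = (!pvCtorKeys.contains a.1 && PySem.Str.startswith a.1 "rbln_") :=
    fun a _ => Bool.and_comm ..
  rw [List.filter_congr hcomm]
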